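-- pv_equiv track=rewrite | github.com/Cosmicwanderer1/Lean4-RSR | scripts/validate_consensus_data.py | validate_skeleton
-- ===== SOURCE A (Python) =====
-- from typing import List, Dict, Any, Tuple
--
-- def validate_skeleton(skeleton: str) -> Tuple[bool, List[str]]:
--     """
--     验证骨架质量
--
--     Returns:
--         (is_valid, issues): 是否有效，以及问题列表
--     """
--     issues = []
--     lines = skeleton.split('\n')
--
--     # 检测连续 sorry（忽略注释和空行）
--     consecutive_sorry_count = 0
--     last_was_sorry = False
--     last_sorry_line = -1
--     sorry_positions = []
--
--     for i, line in enumerate(lines):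
--         stripped = line.strip()
--
--         # 跳过空行和纯注释行
--         if not stripped or stripped.startswith('--'):
--             continue
--
--         if stripped == 'sorry':
--             sorry_positions.append(i + 1)
--             if last_was_sorry:
--                 consecutive_sorry_count += 1
--                 if consecutive_sorry_count == 1:
--                     issues.append(
--                         f"Consecutive sorry at lines {last_sorry_line + 1} and {i + 1}"
--                     )
--             last_was_sorry = True
--             last_sorry_line = i
--         else:
--             last_was_sorry = False
--
--     # 检测 sorry 前是否有指导注释
--     sorry_without_guidance = []
--     for i, line in enumerate(lines):
--         if line.strip() == 'sorry':
--             has_guidance = False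
--             for j in range(max(0, i - 5), i):
--                 prev_line = lines[j].strip()
--                 if prev_line.startswith('--') and len(prev_line) > 10:
--                     has_guidance = True
--                     break
--                 elif prev_line and not prev_line.startswith('--') and prev_line != 'sorry':
--                     has_guidance = True
--                     break
--
--             if not has_guidance:
--                 sorry_without_guidance.append(i + 1)
--
--     if sorry_without_guidance:
--         issues.append(f"Sorry without guidance at lines: {sorry_without_guidance}")
--
--     # 检测 sorry 数量
--     sorry_count = len(sorry_positions)
--     if sorry_count > 10:
--         issues.append(f"Too many sorry ({sorry_count})")
--
--     # 检测是否有 theorem 声明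
--     has_theorem = any('theorem' in line.lower() or 'lemma' in line.lower()
--                       for line in lines[:10])
--     if not has_theorem:
--         issues.append("No theorem/lemma declaration found")
--
--     # 检测是否有 := by
--     has_by = ':= by' in skeleton or ':=by' in skeleton
--     if not has_by:
--         issues.append("Missing ':= by' tactic mode marker")
--
--     is_valid = len(issues) == 0
--     return is_valid, issues
-- ===== SOURCE B (Python) =====
-- from typing import List, Tuple
--
-- def _guides(w: str) -> bool:
--     # a previously seen stripped line that grants guidance for a following sorry
--     if w.startswith('--'):
--         return len(w) > 10
--     return bool(w) and w != 'sorry'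
--
-- def validate_skeleton(skeleton: str) -> Tuple[bool, List[str]]:
--     # one forward pass over the lines maintaining all needed state:
--     # a rolling window of the previous (up to 5) stripped lines, the line number
--     # of the previous code line if it was a bare 'sorry', a once-per-string
--     # emitted flag for the consecutive-sorry issue, a running sorry count and a
--     # theorem/lemma flag checked only for the first 10 lines.
--     window = []            # last up to 5 stripped lines seen so far
--     prev_sorry = None      # 1-based line number of previous code line iff it was 'sorry'
--     emitted = False        # the consecutive-sorry issue is emitted at most once
--     consec = []
--     missing = []
--     sorry_count = 0
--     has_theorem = False
--     for i, raw in enumerate(skeleton.split('\n')):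
--         s = raw.strip()
--         if i < 10 and ('theorem' in raw.lower() or 'lemma' in raw.lower()):
--             has_theorem = True
--         if s == 'sorry':
--             sorry_count += 1
--             if not any(_guides(w) for w in window):
--                 missing.append(i + 1)
--             if prev_sorry is not None and not emitted:
--                 consec.append(f"Consecutive sorry at lines {prev_sorry} and {i + 1}")
--                 emitted = True
--             prev_sorry = i + 1
--         elif s and not s.startswith('--'):
--             prev_sorry = None
--         window.append(s)
--         if len(window) > 5:
--             window.pop(0)
--     issues = consec
--     if missing:
--         issues.append(f"Sorry without guidance at lines: {missing}")
--     if sorry_count > 10: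
--         issues.append(f"Too many sorry ({sorry_count})")
--     if not has_theorem:
--         issues.append("No theorem/lemma declaration found")
--     if ':= by' not in skeleton and ':=by' not in skeleton:
--         issues.append("Missing ':= by' tactic mode marker")
--     return len(issues) == 0, issues
-- ===== Notes on version B (the rewrite author's own statement) =====
-- stated objective: alternative
-- what changed: A's four separate scans over the lines (stateful consecutive-sorry loop, a second loop with an inner index-range re-scan of lines[max(0,i-5):i] for guidance, a count, and a take-10 theorem scan) are fused into ONE forward pass whose accumulator carries a rolling window of the previous up-to-5 stripped lines (so the guidance check needs no random access back into the list), the previous-code-line-was-sorry marker, a once-only emitted flag, the running sorry count and the first-10-lines theorem flag; issues are assembled from the accumulated pieces afterwards.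
import Mathlib
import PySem

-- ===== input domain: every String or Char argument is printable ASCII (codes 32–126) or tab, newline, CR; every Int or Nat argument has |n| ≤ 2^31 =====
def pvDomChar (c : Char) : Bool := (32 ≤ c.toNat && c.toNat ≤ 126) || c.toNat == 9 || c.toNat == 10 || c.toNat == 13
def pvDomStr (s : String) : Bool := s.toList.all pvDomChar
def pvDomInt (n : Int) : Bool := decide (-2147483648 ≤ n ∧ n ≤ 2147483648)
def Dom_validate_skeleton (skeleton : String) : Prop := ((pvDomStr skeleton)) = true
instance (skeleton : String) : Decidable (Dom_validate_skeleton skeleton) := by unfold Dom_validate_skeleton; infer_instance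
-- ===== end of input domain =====

-- B fuses A's four scans into ONE forward pass whose accumulator carries a rolling window of the
-- previous up-to-5 stripped lines (no random access back into the list), the previous-code-sorry
-- marker, an emitted flag, the running sorry count and the first-10-lines theorem flag;
-- objective: alternative decomposition, same cost.

-- helper shared by both ports (identical message formatting in both Pythons)
def vsConsecMsg (a b : Int) : String :=
  "Consecutive sorry at lines " ++ PySem.Int.toStr a ++ " and " ++ PySem.Int.toStr b

def vsIntListRepr (xs : List Int) : String :=
  "[" ++ PySem.Str.join ", " (xs.map PySem.Int.toStr) ++ "]"

-- ===== PORT A =====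

-- A's first for-loop (state: issues, consecutive_sorry_count, last_was_sorry, last_sorry_line, sorry_positions)
def vsPass1 : List (Int × String) → List String → Int → Bool → Int → List Int → List String × List Int
  | [], issues, _cnt, _lastWas, _lastLine, pos => (issues, pos)
  | (i, line) :: rest, issues, cnt, lastWas, lastLine, pos =>
    let s := PySem.Str.strip line
    if s == "" || PySem.Str.startswith s "--" then
      vsPass1 rest issues cnt lastWas lastLine pos
    else if s == "sorry" then
      let pos' := pos ++ [i + 1]
      if lastWas then
        let cnt' := cnt + 1
        let issues' := if cnt' == 1 then issues ++ [vsConsecMsg (lastLine + 1) (i + 1)] else issues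
        vsPass1 rest issues' cnt' true i pos'
      else
        vsPass1 rest issues cnt true i pos'
    else
      vsPass1 rest issues cnt false lastLine pos

-- A's inner 'for j in range(max(0, i-5), i)' loop with its break
def vsGo (lines : List String) : List Int → Bool
  | [] => false
  | j :: rest =>
    let prev := PySem.Str.strip (PySem.List.pyGetD lines j "")
    if PySem.Str.startswith prev "--" && decide (10 < PySem.Str.len prev) then true
    else if prev != "" && !PySem.Str.startswith prev "--" && prev != "sorry" then true
    else vsGo lines rest

-- A's second for-loop (collects sorry_without_guidance)
def vsPass2 (lines : List String) : List (Int × String) → List Int → List Int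
  | [], acc => acc
  | (i, line) :: rest, acc =>
    if PySem.Str.strip line == "sorry" then
      if vsGo lines (PySem.List.pyRange (max 0 (i - 5)) i 1) then
        vsPass2 lines rest acc
      else
        vsPass2 lines rest (acc ++ [i + 1])
    else
      vsPass2 lines rest acc

def validate_skeleton (skeleton : String) : Bool × List String :=
  let lines := (PySem.Str.split? skeleton "\n").getD []
  let p1 := vsPass1 (PySem.List.enumerate lines) [] 0 false (-1) []
  let issues1 := p1.1
  let sorryPositions := p1.2
  let swg := vsPass2 lines (PySem.List.enumerate lines) []
  let issues2 := if swg != [] then issues1 ++ ["Sorry without guidance at lines: " ++ vsIntListRepr swg] else issues1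
  let sorryCount := sorryPositions.length
  let issues3 := if 10 < sorryCount then issues2 ++ ["Too many sorry (" ++ PySem.Int.toStr (sorryCount : Int) ++ ")"] else issues2
  let hasTheorem := (PySem.List.slice lines none (some 10)).any
    (fun line => PySem.Str.isIn "theorem" (PySem.Str.lower line) || PySem.Str.isIn "lemma" (PySem.Str.lower line))
  let issues4 := if !hasTheorem then issues3 ++ ["No theorem/lemma declaration found"] else issues3
  let hasBy := PySem.Str.isIn ":= by" skeleton || PySem.Str.isIn ":=by" skeleton
  let issues5 := if !hasBy then issues4 ++ ["Missing ':= by' tactic mode marker"] else issues4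
  (issues5.length == 0, issues5)

-- ===== PORT B =====

-- B's '_guides' helper
def vsOkGuidance (s : String) : Bool :=
  if PySem.Str.startswith s "--" then decide (10 < PySem.Str.len s)
  else s != "" && s != "sorry"

def vsIsCode (s : String) : Bool := s != "" && !PySem.Str.startswith s "--"

-- B's loop accumulator
structure VsSt where
  window : List String
  prev : Option Int
  emitted : Bool
  consec : List String
  missing : List Int
  cnt : Int
  thm : Bool
deriving Repr

-- B's single forward pass (Python's 'window.append(s); if len>5: window.pop(0)' = append then drop head)
def vsLoop : List (Int × String) → VsSt → VsSt
  | [], st => st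
  | (i, raw) :: rest, st =>
    let s := PySem.Str.strip raw
    let thm := st.thm || (decide (i < 10) &&
      (PySem.Str.isIn "theorem" (PySem.Str.lower raw) || PySem.Str.isIn "lemma" (PySem.Str.lower raw)))
    let st' :=
      if s == "sorry" then
        let missing := if st.window.any vsOkGuidance then st.missing else st.missing ++ [i + 1]
        let ce : List String × Bool :=
          match st.prev with
          | some p => if !st.emitted then (st.consec ++ [vsConsecMsg p (i + 1)], true) else (st.consec, st.emitted)
          | none => (st.consec, st.emitted)
        { st with cnt := st.cnt + 1, missing := missing, consec := ce.1, emitted := ce.2,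
                  prev := some (i + 1), thm := thm }
      else if vsIsCode s then { st with prev := none, thm := thm }
      else { st with thm := thm }
    let w2 := st'.window ++ [s]
    vsLoop rest { st' with window := if decide (5 < w2.length) then w2.tail else w2 }

def validate_skeleton_alt (skeleton : String) : Bool × List String :=
  let lines := (PySem.Str.split? skeleton "\n").getD []
  let st := vsLoop (PySem.List.enumerate lines) ⟨[], none, false, [], [], 0, false⟩
  let hasBy := PySem.Str.isIn ":= by" skeleton || PySem.Str.isIn ":=by" skeleton
  let issues :=
    st.consec
    ++ (if st.missing != [] then ["Sorry without guidance at lines: " ++ vsIntListRepr st.missing] else [])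
    ++ (if 10 < st.cnt then ["Too many sorry (" ++ PySem.Int.toStr st.cnt ++ ")"] else [])
    ++ (if !st.thm then ["No theorem/lemma declaration found"] else [])
    ++ (if !hasBy then ["Missing ':= by' tactic mode marker"] else [])
  (issues.length == 0, issues)

-- ===== PRECONDITION & SPEC =====
def Spec_validate_skeleton (skeleton : String) (out : Bool × List String) : Prop := out = validate_skeleton_alt skeleton
instance (skeleton : String) (out : Bool × List String) : Decidable (Spec_validate_skeleton skeleton out) := by unfold Spec_validate_skeleton; infer_instance

-- ===== CLAIM (what is proved, stated in full; the proofs are below) =====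
def Claim_equal_validate_skeleton : Prop := ∀ (skeleton : String), Dom_validate_skeleton skeleton → Spec_validate_skeleton skeleton (validate_skeleton skeleton)

-- ===== LEMMAS AND PROOFS =====

-- proof-only helpers: the enumerated, stripped code lines, and closed forms of both loops
def vsCode (l : List (Int × String)) : List (Int × String) :=
  (l.map (fun p => (p.1, PySem.Str.strip p.2))).filter (fun p => vsIsCode p.2)

def vsSel (p : Int × String) : Option Int := if p.2 == "sorry" then some (p.1 + 1) else none

-- first adjacent code-sorry pair, 0-based previous index (A's shape)
def vsIssueFrom : Option Int → List (Int × String) → List String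
  | _, [] => []
  | prev, (i, s) :: rest =>
    if s == "sorry" then
      match prev with
      | some p => [vsConsecMsg (p + 1) (i + 1)]
      | none => vsIssueFrom (some i) rest
    else vsIssueFrom none rest

-- same, 1-based previous line number (B's shape)
def vsIssueFromB : Option Int → List (Int × String) → List String
  | _, [] => []
  | prev, (i, s) :: rest =>
    if s == "sorry" then
      match prev with
      | some p => [vsConsecMsg p (i + 1)]
      | none => vsIssueFromB (some (i + 1)) rest
    else vsIssueFromB none rest

lemma vsCode_nil : vsCode [] = [] := rfl

lemma vsIsCode_sorry : vsIsCode "sorry" = true := by decide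

lemma vsCode_cons (i : Int) (line : String) (tl : List (Int × String)) :
    vsCode ((i, line) :: tl) =
      if vsIsCode (PySem.Str.strip line) then (i, PySem.Str.strip line) :: vsCode tl else vsCode tl := by
  simp [vsCode, List.filter_cons]

lemma vsIsCode_eq (s : String) :
    vsIsCode s = !(s == "" || PySem.Str.startswith s "--") := by
  simp [vsIsCode, bne]

lemma vsEnumerate_map {α β : Type} (f : α → β) (xs : List α) (s : Int) :
    PySem.List.enumerate (xs.map f) s = (PySem.List.enumerate xs s).map (fun p => (p.1, f p.2)) := by
  induction xs generalizing s with
  | nil => simp [PySem.List.enumerate_nil]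
  | cons a t ih => simp [PySem.List.enumerate_cons, ih]

lemma vsPass1_eq (l : List (Int × String)) :
    ∀ (issues : List String) (cnt : Int) (lastWas : Bool) (lastLine : Int) (pos : List Int),
      0 ≤ cnt →
      vsPass1 l issues cnt lastWas lastLine pos =
        (issues ++ (if cnt = 0 then vsIssueFrom (if lastWas then some lastLine else none) (vsCode l) else []),
         pos ++ (vsCode l).filterMap vsSel) := by
  induction l with
  | nil => intro issues cnt lastWas lastLine pos hc; simp [vsPass1, vsCode_nil, vsIssueFrom]
  | cons hd tl ih =>
    obtain ⟨i, line⟩ := hd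
    intro issues cnt lastWas lastLine pos hc
    by_cases h1 : (PySem.Str.strip line == "" || PySem.Str.startswith (PySem.Str.strip line) "--") = true
    · have hcode : vsIsCode (PySem.Str.strip line) = false := by
        rw [vsIsCode_eq, h1]; rfl
      simp only [vsPass1, h1, if_true, vsCode_cons, hcode, Bool.false_eq_true, if_false]
      exact ih issues cnt lastWas lastLine pos hc
    · have h1' : (PySem.Str.strip line == "" || PySem.Str.startswith (PySem.Str.strip line) "--") = false := by
        simpa using h1
      have hcode : vsIsCode (PySem.Str.strip line) = true := by
        rw [vsIsCode_eq, h1']; rfl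
      by_cases h2 : (PySem.Str.strip line == "sorry") = true
      · have hs : PySem.Str.strip line = "sorry" := by simpa using h2
        cases lastWas with
        | true =>
          by_cases hcz : cnt = 0
          · subst hcz
            have e1 : ((0 : Int) + 1 == 1) = true := by decide
            simp only [vsPass1, h1', Bool.false_eq_true, if_false, h2, if_true, e1]
            rw [ih (issues ++ [vsConsecMsg (lastLine + 1) (i + 1)]) (0 + 1) true i (pos ++ [i + 1]) (by omega)]
            have e2 : ¬ ((0 : Int) + 1 = 0) := by omega
            simp [vsCode_cons, vsIsCode_sorry, hs, vsIssueFrom, vsSel]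
          · have e1 : (cnt + 1 == 1) = false := by simp; omega
            simp only [vsPass1, h1', Bool.false_eq_true, if_false, h2, if_true, e1]
            rw [ih issues (cnt + 1) true i (pos ++ [i + 1]) (by omega)]
            have e2 : ¬ (cnt + 1 = 0) := by omega
            simp [vsCode_cons, vsIsCode_sorry, hs, vsSel, hcz, e2]
        | false =>
          simp only [vsPass1, h1', Bool.false_eq_true, if_false, h2, if_true]
          rw [ih issues cnt true i (pos ++ [i + 1]) hc]
          simp [vsCode_cons, vsIsCode_sorry, hs, vsIssueFrom, vsSel]
      · have h2' : (PySem.Str.strip line == "sorry") = false := by simpa using h2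
        have hs3 : PySem.Str.strip line ≠ "sorry" := by simpa using h2'
        simp only [vsPass1, h1', Bool.false_eq_true, if_false, h2', vsCode_cons, hcode, if_true]
        rw [ih issues cnt false lastLine pos hc]
        cases hlw : lastWas <;>
          simp [vsIssueFrom, h2', hs3, vsSel]

-- the 0-based and 1-based first-pair scans agree
lemma vsIssueFromB_eq (c : List (Int × String)) :
    ∀ (o : Option Int), vsIssueFromB (o.map (· + 1)) c = vsIssueFrom o c := by
  induction c with
  | nil => intro o; cases o <;> rfl
  | cons x rest ih =>
    intro o
    obtain ⟨i, s⟩ := x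
    by_cases hs : s = "sorry"
    · subst hs
      cases o with
      | none =>
        have := ih (some i)
        simpa [vsIssueFromB, vsIssueFrom] using this
      | some p => simp [vsIssueFromB, vsIssueFrom]
    · simpa [vsIssueFromB, vsIssueFrom, hs] using ih none

lemma vsSel_length (l : List (Int × String)) :
    (l.filterMap vsSel).length = l.countP (fun p => p.2 == "sorry") := by
  induction l with
  | nil => rfl
  | cons a t ih =>
    rw [List.filterMap_cons, List.countP_cons]
    by_cases h : a.2 = "sorry"
    · have hv : vsSel a = some (a.1 + 1) := by simp [vsSel, h]
      simp [hv, h, ih]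
    · have hv : vsSel a = none := by simp [vsSel, h]
      simp [hv, h, ih]

lemma vsBneDecide (s t : String) : (s != t) = !decide (s = t) := by
  by_cases h : s = t <;> simp [h]

lemma vsGo_eq_any (lines : List String) (js : List Int) :
    vsGo lines js = js.any (fun j => vsOkGuidance (PySem.Str.strip (PySem.List.pyGetD lines j ""))) := by
  induction js with
  | nil => rfl
  | cons j rest ih =>
    rw [List.any_cons, ← ih]
    cases hA : PySem.Chars.startswith (PySem.Chars.strip (PySem.List.pyGetD lines j "").toList) ['-', '-'] <;>
      simp [vsGo, vsOkGuidance, hA, vsBneDecide]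

lemma vsRange_any_eq (xs : List String) (p : String → Bool) :
    ∀ (n lo : Nat), lo + n ≤ xs.length →
      ((PySem.List.pyRange (lo : Int) ((lo : Int) + (n : Int)) 1).any
        (fun j => p (PySem.List.pyGetD xs j ""))) = ((xs.drop lo).take n).any p := by
  intro n
  induction n with
  | zero =>
    intro lo _
    have hnil : PySem.List.pyRange ((lo : Nat) : Int) (((lo : Nat) : Int) + (((0 : Nat)) : Int)) 1 = [] := by
      rw [List.eq_nil_iff_forall_not_mem]
      intro j hj
      simp at hj
    rw [hnil]
    simp
  | succ n ih =>
    intro lo hle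
    have hlt : lo < xs.length := by omega
    have hcons : PySem.List.pyRange (lo : Int) ((lo : Int) + ((n + 1 : Nat) : Int)) 1 =
        (lo : Int) :: PySem.List.pyRange ((lo : Int) + 1) ((lo : Int) + ((n + 1 : Nat) : Int)) 1 :=
      PySem.List.pyRange_one_cons (by push_cast; omega)
    have hget : PySem.List.pyGetD xs ((lo : Nat) : Int) "" = xs[lo] := by
      rw [PySem.List.pyGetD_natCast]
      exact List.getD_eq_getElem _ _ hlt
    have hdrop : xs.drop lo = xs[lo] :: xs.drop (lo + 1) := List.drop_eq_getElem_cons hlt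
    have hihe := ih (lo + 1) (by omega)
    have harg2 : ((lo : Int) + 1) = (((lo + 1 : Nat)) : Int) := by push_cast; ring
    have harg3 : ((lo : Int) + ((n + 1 : Nat) : Int)) = ((((lo + 1 : Nat)) : Int) + ((n : Nat) : Int)) := by
      push_cast; ring
    simp only [hcons, List.any_cons, hget, hdrop, List.take_succ_cons]
    congr 1
    rw [harg2, harg3]
    exact hihe

lemma vsPass2_eq (lines : List String) (l : List (Int × String)) :
    ∀ acc, vsPass2 lines l acc =
      acc ++ l.filterMap (fun p =>
        if PySem.Str.strip p.2 == "sorry" &&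
            !(vsGo lines (PySem.List.pyRange (max 0 (p.1 - 5)) p.1 1))
        then some (p.1 + 1) else none) := by
  induction l with
  | nil => intro acc; simp [vsPass2]
  | cons hd tl ih =>
    obtain ⟨i, line⟩ := hd
    intro acc
    by_cases h1 : (PySem.Str.strip line == "sorry") = true
    · have hs : PySem.Str.strip line = "sorry" := by simpa using h1
      by_cases h2 : vsGo lines (PySem.List.pyRange (max 0 (i - 5)) i 1) = true
      · simp [vsPass2, hs, h2, ih]
      · have h2' : vsGo lines (PySem.List.pyRange (max 0 (i - 5)) i 1) = false := by simpa using h2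
        simp [vsPass2, hs, h2', ih]
    · have h1' : (PySem.Str.strip line == "sorry") = false := by simpa using h1
      have hs3 : PySem.Str.strip line ≠ "sorry" := by simpa using h1'
      simp [vsPass2, h1', hs3, ih]

lemma vsIf_append {α : Type} (c : Prop) [Decidable c] (x m : List α) :
    (if c then x ++ m else x) = x ++ (if c then m else []) := by
  split_ifs <;> simp

lemma vsCount_aux (lines : List String) : ∀ s : Int,
    List.countP (fun p : Int × String => p.2 == "sorry") (vsCode (PySem.List.enumerate lines s)) =
      List.count "sorry" (lines.map PySem.Str.strip) := by
  induction lines with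
  | nil => intro s; rfl
  | cons a t ih =>
    intro s
    rw [PySem.List.enumerate_cons, vsCode_cons, List.map_cons]
    by_cases hx : (PySem.Str.strip a == "sorry") = true
    · have ha : PySem.Str.strip a = "sorry" := by simpa using hx
      simp [ha, vsIsCode_sorry, ih]
    · have hx' : (PySem.Str.strip a == "sorry") = false := by simpa using hx
      have hx3 : PySem.Str.strip a ≠ "sorry" := by simpa using hx'
      by_cases hcode : vsIsCode (PySem.Str.strip a) = true
      · simp [hcode, hx', hx3, ih]
      · have hcode' : vsIsCode (PySem.Str.strip a) = false := by simpa using hcode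
        simp [hcode', hx3, ih]

lemma vsCount_eq (lines : List String) :
    ((vsCode (PySem.List.enumerate lines)).filterMap vsSel).length =
      PySem.List.count (lines.map PySem.Str.strip) "sorry" := by
  rw [vsSel_length, PySem.List.count_eq]
  exact vsCount_aux lines 0

-- the window slice of A's guidance check, as drop/take of the stripped lines
lemma vsWindow_slice (S : List String) (k : Nat) :
    PySem.List.slice S (some (max 0 ((k : Int) - 5))) (some (k : Int)) = (S.take k).drop (k - 5) := by
  have e1 : max 0 ((k : Int) - 5) = ((k - 5 : Nat) : Int) := by
    by_cases h5 : 5 ≤ k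
    · rw [max_eq_right (by omega)]; omega
    · rw [max_eq_left (by omega)]; omega
  rw [e1, PySem.List.slice_natCast, List.drop_take]

lemma vsGuidance_eq (lines : List String) (k : Nat) (hk : k < lines.length) :
    vsGo lines (PySem.List.pyRange (max 0 ((k : Int) - 5)) (k : Int) 1) =
      ((PySem.List.slice (lines.map PySem.Str.strip) (some (max 0 ((k : Int) - 5))) (some (k : Int))).any vsOkGuidance) := by
  have e1 : max 0 ((k : Int) - 5) = ((k - 5 : Nat) : Int) := by
    by_cases h5 : 5 ≤ k
    · rw [max_eq_right (by omega)]; omega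
    · rw [max_eq_left (by omega)]; omega
  rw [e1, vsGo_eq_any]
  have e0 : ∀ j : Int, PySem.List.pyGetD (lines.map PySem.Str.strip) j "" =
      PySem.Str.strip (PySem.List.pyGetD lines j "") := by
    intro j
    rw [show ("" : String) = PySem.Str.strip "" from rfl]
    apply PySem.List.pyGetD_map
  have e2 : ∀ j : Int, vsOkGuidance (PySem.Str.strip (PySem.List.pyGetD lines j "")) =
      vsOkGuidance (PySem.List.pyGetD (lines.map PySem.Str.strip) j "") := by
    intro j
    rw [e0 j]
  simp only [e2]
  rw [PySem.List.slice_natCast]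
  rw [show ((k : Nat) : Int) = (((k - 5 : Nat)) : Int) + (((k - (k - 5) : Nat)) : Int) by omega]
  exact vsRange_any_eq (lines.map PySem.Str.strip) vsOkGuidance (k - (k - 5)) (k - 5)
    (by simp only [List.length_map]; omega)

lemma vsMissing_eq (lines : List String) :
    vsPass2 lines (PySem.List.enumerate lines) [] =
      (PySem.List.enumerate (lines.map PySem.Str.strip)).filterMap (fun p =>
        if p.2 == "sorry" && !((PySem.List.slice (lines.map PySem.Str.strip) (some (max 0 (p.1 - 5))) (some p.1)).any vsOkGuidance)
        then some (p.1 + 1) else none) := by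
  rw [vsPass2_eq, List.nil_append, vsEnumerate_map, List.filterMap_map]
  apply List.filterMap_congr
  intro p hp
  obtain ⟨k, hk, rfl⟩ := (PySem.List.mem_enumerate_iff _ _ _).mp hp
  simp only [Function.comp_apply]
  rw [show ((0 : Int) + (k : Nat)) = ((k : Nat) : Int) by omega]
  rw [vsGuidance_eq lines k hk]

-- B-side lemmas: the rolling window update
lemma vsWindow_step (S : List String) (k : Nat) (hk : k < S.length) :
    (if decide (5 < ((((S.take k).drop (k - 5)) ++ [S[k]]).length)) then (((S.take k).drop (k - 5)) ++ [S[k]]).tail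
     else ((S.take k).drop (k - 5)) ++ [S[k]]) = (S.take (k + 1)).drop (k + 1 - 5) := by
  have hlen : (S.take k).length = k := by simp [List.length_take]; omega
  have htake : S.take (k + 1) = S.take k ++ [S[k]] := by
    rw [List.take_add_one, List.getElem?_eq_getElem hk]; rfl
  have hWlen : (((S.take k).drop (k - 5)) ++ [S[k]]).length = k - (k - 5) + 1 := by
    simp [List.length_drop, hlen]
  by_cases h5 : 5 ≤ k
  · have hc : decide (5 < ((((S.take k).drop (k - 5)) ++ [S[k]]).length)) = true := by
      rw [hWlen]; simp; omega
    rw [hc, if_pos rfl]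
    have hne : ((S.take k).drop (k - 5)) ≠ [] := by
      intro h
      have := congrArg List.length h
      simp [List.length_drop, hlen] at this
      omega
    rw [List.tail_append_of_ne_nil hne, List.tail_drop, htake,
        List.drop_append_of_le_length (by omega)]
    congr 2 <;> omega
  · have hc : decide (5 < ((((S.take k).drop (k - 5)) ++ [S[k]]).length)) = false := by
      rw [hWlen]; simp; omega
    rw [hc, if_neg (by simp), htake, List.drop_append_of_le_length (by rw [hlen]; omega)]
    congr 2 <;> omega

-- the first-10-lines theorem scan
lemma vsThm_eq (lines : List String) : ∀ (k : Nat),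
    ((PySem.List.enumerate lines (k : Int)).any (fun p => decide (p.1 < 10) &&
        (PySem.Str.isIn "theorem" (PySem.Str.lower p.2) || PySem.Str.isIn "lemma" (PySem.Str.lower p.2))))
      = (lines.take (10 - k)).any
        (fun line => PySem.Str.isIn "theorem" (PySem.Str.lower line) || PySem.Str.isIn "lemma" (PySem.Str.lower line)) := by
  induction lines with
  | nil => intro k; simp [PySem.List.enumerate_nil]
  | cons a t ih =>
    intro k
    rw [PySem.List.enumerate_cons, List.any_cons]
    rw [show ((k : Int) + 1) = (((k + 1 : Nat)) : Int) by push_cast; ring, ih (k + 1)]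
    by_cases h : k < 10
    · have hd : decide ((k : Int) < 10) = true := by simp; omega
      have h10 : 10 - k = (10 - (k + 1)) + 1 := by omega
      rw [hd, h10, List.take_succ_cons, List.any_cons]
      simp
    · have hd : decide ((k : Int) < 10) = false := by simp; omega
      have h1 : 10 - k = 0 := by omega
      have h2 : 10 - (k + 1) = 0 := by omega
      rw [hd, h1, h2]
      simp

set_option maxRecDepth 8000 in
-- the single-pass invariant: vsLoop's four delivered components in closed form
lemma vsLoop_spec (L : List String) :
    ∀ (R : List String) (k : Nat) (st : VsSt),
      R = L.drop k →
      st.window = ((L.map PySem.Str.strip).take k).drop (k - 5) →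
      (vsLoop (PySem.List.enumerate R (k : Int)) st).consec
          = st.consec ++ (if st.emitted then [] else vsIssueFromB st.prev (vsCode (PySem.List.enumerate R (k : Int)))) ∧
      (vsLoop (PySem.List.enumerate R (k : Int)) st).missing
          = st.missing ++ (PySem.List.enumerate (R.map PySem.Str.strip) (k : Int)).filterMap (fun p =>
              if p.2 == "sorry" && !((PySem.List.slice (L.map PySem.Str.strip) (some (max 0 (p.1 - 5))) (some p.1)).any vsOkGuidance)
              then some (p.1 + 1) else none) ∧
      (vsLoop (PySem.List.enumerate R (k : Int)) st).cnt
          = st.cnt + (List.count "sorry" (R.map PySem.Str.strip) : Int) ∧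
      (vsLoop (PySem.List.enumerate R (k : Int)) st).thm
          = (st.thm || (PySem.List.enumerate R (k : Int)).any (fun p => decide (p.1 < 10) &&
              (PySem.Str.isIn "theorem" (PySem.Str.lower p.2) || PySem.Str.isIn "lemma" (PySem.Str.lower p.2)))) := by
  intro R
  induction R with
  | nil =>
    intro k st hR hW
    cases he : st.emitted <;>
      simp [PySem.List.enumerate_nil, vsLoop, vsIssueFromB, vsCode_nil]
  | cons r R' ih =>
    intro k st hR hW
    have hlen := congrArg List.length hR
    simp [List.length_drop] at hlen
    have hk : k < L.length := by omega
    have hkS : k < (L.map PySem.Str.strip).length := by simpa using hk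
    have hdropk : L.drop k = L[k] :: L.drop (k + 1) := List.drop_eq_getElem_cons hk
    rw [hdropk] at hR
    rw [List.cons.injEq] at hR
    obtain ⟨hr, hR'⟩ := hR
    have hSget : (L.map PySem.Str.strip)[k]'hkS = PySem.Str.strip r := by
      rw [List.getElem_map]; rw [← hr]
    have hwstep := vsWindow_step (L.map PySem.Str.strip) k hkS
    rw [hSget] at hwstep
    have hwin : (if decide (5 < (st.window ++ [PySem.Str.strip r]).length) then (st.window ++ [PySem.Str.strip r]).tail
        else (st.window ++ [PySem.Str.strip r])) =
        ((L.map PySem.Str.strip).take (k + 1)).drop (k + 1 - 5) := by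
      rw [hW]; exact hwstep
    have hslice : (PySem.List.slice (L.map PySem.Str.strip) (some (max 0 ((k : Int) - 5))) (some (k : Int))) = st.window := by
      rw [vsWindow_slice, hW]
    have hcast : ((k : Int) + 1) = (((k + 1 : Nat)) : Int) := by push_cast; ring
    have hR'c : R' = L.drop (k + 1) := hR'
    rw [PySem.List.enumerate_cons, List.map_cons, PySem.List.enumerate_cons]
    by_cases hs : PySem.Str.strip r = "sorry"
    · have hbeq : (PySem.Str.strip r == "sorry") = true := by simp [hs]
      -- the emitted/consec update of the sorry branch, as a pair
      have hred : vsLoop (((k : Int), r) :: PySem.List.enumerate R' ((k : Int) + 1)) st =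
          vsLoop (PySem.List.enumerate R' ((k : Int) + 1))
            ⟨(if decide (5 < (st.window ++ [PySem.Str.strip r]).length) then (st.window ++ [PySem.Str.strip r]).tail
                else (st.window ++ [PySem.Str.strip r])),
             some ((k : Int) + 1),
             (match st.prev with
              | some _ => if !st.emitted then true else st.emitted
              | none => st.emitted),
             (match st.prev with
              | some p => if !st.emitted then st.consec ++ [vsConsecMsg p ((k : Int) + 1)] else st.consec
              | none => st.consec),
             (if st.window.any vsOkGuidance then st.missing else st.missing ++ [(k : Int) + 1]),
             st.cnt + 1,
             st.thm || (decide ((k : Int) < 10) &&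
               (PySem.Str.isIn "theorem" (PySem.Str.lower r) || PySem.Str.isIn "lemma" (PySem.Str.lower r)))⟩ := by
        simp only [vsLoop, hbeq, if_true]
        cases st.prev <;> cases st.emitted <;> rfl
      rw [hred, hcast]
      obtain ⟨i1, i2, i3, i4⟩ := ih (k + 1)
        ⟨(if decide (5 < (st.window ++ [PySem.Str.strip r]).length) then (st.window ++ [PySem.Str.strip r]).tail
            else (st.window ++ [PySem.Str.strip r])),
         some (((k + 1 : Nat)) : Int),
         (match st.prev with
          | some _ => if !st.emitted then true else st.emitted
          | none => st.emitted),
         (match st.prev with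
          | some p => if !st.emitted then st.consec ++ [vsConsecMsg p (((k + 1 : Nat)) : Int)] else st.consec
          | none => st.consec),
         (if st.window.any vsOkGuidance then st.missing else st.missing ++ [(((k + 1 : Nat)) : Int)]),
         st.cnt + 1,
         st.thm || (decide ((k : Int) < 10) &&
           (PySem.Str.isIn "theorem" (PySem.Str.lower r) || PySem.Str.isIn "lemma" (PySem.Str.lower r)))⟩
        hR'c hwin
      refine ⟨?_, ?_, ?_, ?_⟩
      · rw [i1]
        rw [vsCode_cons, hs]
        cases hp : st.prev with
        | some p =>
          cases he : st.emitted <;>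
            (push_cast; simp only [vsIsCode_sorry]; simp [vsIssueFromB])
        | none =>
          cases he : st.emitted <;>
            (push_cast; simp only [vsIsCode_sorry]; simp [vsIssueFromB])
      · rw [i2, List.filterMap_cons]
        push_cast
        simp only [hs, hslice]
        by_cases hg : st.window.any vsOkGuidance = true
        · simp [hg]
        · simp [hg]
      · rw [i3]
        simp [hs]
        ring
      · rw [i4, List.any_cons]
        simp [Bool.or_assoc]
    · have hbeq : (PySem.Str.strip r == "sorry") = false := by simp [hs]
      by_cases hc : vsIsCode (PySem.Str.strip r) = true
      · have hred : vsLoop (((k : Int), r) :: PySem.List.enumerate R' ((k : Int) + 1)) st =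
            vsLoop (PySem.List.enumerate R' ((k : Int) + 1))
              ⟨(if decide (5 < (st.window ++ [PySem.Str.strip r]).length) then (st.window ++ [PySem.Str.strip r]).tail
                  else (st.window ++ [PySem.Str.strip r])),
               none, st.emitted, st.consec, st.missing, st.cnt,
               st.thm || (decide ((k : Int) < 10) &&
                 (PySem.Str.isIn "theorem" (PySem.Str.lower r) || PySem.Str.isIn "lemma" (PySem.Str.lower r)))⟩ := by
          simp only [vsLoop, hbeq, hc, Bool.false_eq_true, if_false, if_true]
        rw [hred, hcast]
        obtain ⟨i1, i2, i3, i4⟩ := ih (k + 1)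
          ⟨(if decide (5 < (st.window ++ [PySem.Str.strip r]).length) then (st.window ++ [PySem.Str.strip r]).tail
              else (st.window ++ [PySem.Str.strip r])),
           none, st.emitted, st.consec, st.missing, st.cnt,
           st.thm || (decide ((k : Int) < 10) &&
             (PySem.Str.isIn "theorem" (PySem.Str.lower r) || PySem.Str.isIn "lemma" (PySem.Str.lower r)))⟩
          hR'c hwin
        refine ⟨?_, ?_, ?_, ?_⟩
        · rw [i1, vsCode_cons]
          cases he : st.emitted <;>
            cases hp : st.prev <;>
              (push_cast; simp only [hc]; simp [vsIssueFromB, hbeq])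
        · rw [i2, List.filterMap_cons]
          simp [hbeq]
        · rw [i3]
          simp [hs]
        · rw [i4, List.any_cons]
          simp [Bool.or_assoc]
      · have hc' : vsIsCode (PySem.Str.strip r) = false := by simpa using hc
        have hred : vsLoop (((k : Int), r) :: PySem.List.enumerate R' ((k : Int) + 1)) st =
            vsLoop (PySem.List.enumerate R' ((k : Int) + 1))
              ⟨(if decide (5 < (st.window ++ [PySem.Str.strip r]).length) then (st.window ++ [PySem.Str.strip r]).tail
                  else (st.window ++ [PySem.Str.strip r])),
               st.prev, st.emitted, st.consec, st.missing, st.cnt,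
               st.thm || (decide ((k : Int) < 10) &&
                 (PySem.Str.isIn "theorem" (PySem.Str.lower r) || PySem.Str.isIn "lemma" (PySem.Str.lower r)))⟩ := by
          simp only [vsLoop, hbeq, hc', Bool.false_eq_true, if_false]
        rw [hred, hcast]
        obtain ⟨i1, i2, i3, i4⟩ := ih (k + 1)
          ⟨(if decide (5 < (st.window ++ [PySem.Str.strip r]).length) then (st.window ++ [PySem.Str.strip r]).tail
              else (st.window ++ [PySem.Str.strip r])),
           st.prev, st.emitted, st.consec, st.missing, st.cnt,
           st.thm || (decide ((k : Int) < 10) &&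
             (PySem.Str.isIn "theorem" (PySem.Str.lower r) || PySem.Str.isIn "lemma" (PySem.Str.lower r)))⟩
          hR'c hwin
        refine ⟨?_, ?_, ?_, ?_⟩
        · rw [i1, vsCode_cons, hc']
          simp
        · rw [i2, List.filterMap_cons]
          push_cast
          simp [hbeq]
        · rw [i3]
          simp [hs]
        · rw [i4, List.any_cons]
          simp [Bool.or_assoc]

lemma vsMain (skeleton : String) : validate_skeleton skeleton = validate_skeleton_alt skeleton := by
  simp only [validate_skeleton, validate_skeleton_alt]
  obtain ⟨c1, c2, c3, c4⟩ := vsLoop_spec ((PySem.Str.split? skeleton "\n").getD [])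
    ((PySem.Str.split? skeleton "\n").getD []) 0 ⟨[], none, false, [], [], 0, false⟩ (by simp) (by simp)
  simp only [Nat.cast_zero] at c1 c2 c3 c4
  have hp1 : vsPass1 (PySem.List.enumerate ((PySem.Str.split? skeleton "\n").getD [])) [] 0 false (-1) [] =
      (vsIssueFrom none (vsCode (PySem.List.enumerate ((PySem.Str.split? skeleton "\n").getD []))),
       (vsCode (PySem.List.enumerate ((PySem.Str.split? skeleton "\n").getD []))).filterMap vsSel) := by
    rw [vsPass1_eq _ _ _ _ _ _ (by omega)]
    simp
  have hsl : PySem.List.slice ((PySem.Str.split? skeleton "\n").getD []) none (some 10)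
      = ((PySem.Str.split? skeleton "\n").getD []).take 10 := by
    rw [show ((10 : Int)) = (((10 : Nat)) : Int) by norm_num, PySem.List.slice_to_natCast]
  have hIB : vsIssueFromB none (vsCode (PySem.List.enumerate ((PySem.Str.split? skeleton "\n").getD [])))
      = vsIssueFrom none (vsCode (PySem.List.enumerate ((PySem.Str.split? skeleton "\n").getD []))) := by
    have := vsIssueFromB_eq (vsCode (PySem.List.enumerate ((PySem.Str.split? skeleton "\n").getD []))) none
    simpa using this
  have hthm := vsThm_eq ((PySem.Str.split? skeleton "\n").getD []) 0
  simp only [Nat.cast_zero, Nat.sub_zero] at hthm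
  simp only [hp1, hsl, vsMissing_eq, vsCount_eq, c1, c2, c3, c4, hIB, hthm,
    Bool.false_or, List.nil_append, zero_add, if_false, Bool.false_eq_true]
  rw [vsIf_append, vsIf_append, vsIf_append, vsIf_append]
  simp only [PySem.List.count_eq]
  have hc10 : ((10 : Int) < ((List.count "sorry" (((PySem.Str.split? skeleton "\n").getD []).map PySem.Str.strip) : Nat) : Int))
      ↔ (10 < List.count "sorry" (((PySem.Str.split? skeleton "\n").getD []).map PySem.Str.strip)) := by
    exact_mod_cast Iff.rfl
  simp [hc10, List.append_assoc]

-- ===== VERDICT (by name: the statement is the Claim_ definition above) =====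
theorem validate_skeleton_spec : Claim_equal_validate_skeleton := by
  intro skeleton _hdom
  unfold Spec_validate_skeleton
  exact vsMain skeleton
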